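-- pv_equiv track=rewrite | github.com/paritoshtripathi935/Venom | Programming/reduceArrayLength.py | reduceArrayLength
-- ===== SOURCE A (Python) =====
-- def reduceArrayLength(X):
--     # Write your code here
--     if len(X) == 1:
--         return 'YES'
--     else:
--         for i in range(len(X) - 1):
--             if X[i] < X[i + 1]: # if the current element is less than the next element then remove the next element
--                 return reduceArrayLength(X[:i] + X[i + 1:]) # return the result of the recursive call
--         return 'NO'
-- ===== SOURCE B (Python) =====
-- def reduceArrayLength(X):
--     stack = []
--     for x in X:
--         while stack and stack[-1] < x:
--             stack.pop()
--         stack.append(x)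
--     return 'YES' if len(stack) == 1 else 'NO'
-- ===== Notes on version B (the rewrite author's own statement) =====
-- stated objective: faster
-- what changed: Replaces the quadratic restart-the-scan recursive removal of ascending-pair elements by a single left-to-right pass with a monotonic (non-increasing) stack; YES iff the final stack has size 1.
import Mathlib
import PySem

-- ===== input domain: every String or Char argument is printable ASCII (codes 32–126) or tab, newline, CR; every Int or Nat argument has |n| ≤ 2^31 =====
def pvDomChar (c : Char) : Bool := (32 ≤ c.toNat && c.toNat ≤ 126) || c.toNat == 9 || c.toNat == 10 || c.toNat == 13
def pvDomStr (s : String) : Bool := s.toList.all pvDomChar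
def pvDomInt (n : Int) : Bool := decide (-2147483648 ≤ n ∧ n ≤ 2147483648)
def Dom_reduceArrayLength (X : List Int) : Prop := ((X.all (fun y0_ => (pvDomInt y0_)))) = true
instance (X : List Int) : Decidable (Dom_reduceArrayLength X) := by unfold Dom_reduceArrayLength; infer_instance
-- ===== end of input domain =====

-- B replaces A's quadratic restart-the-scan removal recursion by one monotonic-stack pass (faster).

-- ===== PORT A =====
-- A: if len(X)==1 → 'YES'; else scan i ∈ range(len(X)-1), on the first X[i] < X[i+1]
-- recurse on X[:i] + X[i+1:]; if the scan finishes, 'NO'.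
-- X[i] is read via pyGetD: the loop guard keeps both indices in range, so the default is never used.
mutual
def reduceArrayLength (X : List Int) : String :=
  if X.length == 1 then "YES"
  else reduceArrayLengthLoop X 0
termination_by (X.length, X.length + 1)
decreasing_by exact Prod.Lex.right _ (by omega)

def reduceArrayLengthLoop (X : List Int) (i : Nat) : String :=
  if i < X.length - 1 then
    if PySem.List.pyGetD X (i : Int) 0 < PySem.List.pyGetD X ((i : Int) + 1) 0 then
      reduceArrayLength (PySem.List.slice X none (some (i : Int)) ++
                         PySem.List.slice X (some ((i : Int) + 1)) none)
    else reduceArrayLengthLoop X (i + 1)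
  else "NO"
termination_by (X.length, X.length - i)
decreasing_by
  · apply Prod.Lex.left
    have hc : ((i : Int) + 1) = ((i + 1 : Nat) : Int) := by push_cast; ring
    rw [PySem.List.slice_to_natCast, hc, PySem.List.slice_from_natCast]
    simp only [List.length_append, List.length_take, List.length_drop]
    omega
  · exact Prod.Lex.right _ (by omega)
end

-- ===== PORT B =====
-- B keeps a non-increasing stack; the Lean stack grows at the HEAD (Python appends/pops at
-- the end), i.e. it is Python's stack reversed — lengths agree, which is all B reads.
def reduceArrayLengthPop (st : List Int) (x : Int) : List Int :=
  match st with
  | [] => []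
  | h :: t => if h < x then reduceArrayLengthPop t x else h :: t

def reduceArrayLengthStep (st : List Int) (x : Int) : List Int :=
  x :: reduceArrayLengthPop st x

def reduceArrayLength_alt (X : List Int) : String :=
  if (X.foldl reduceArrayLengthStep []).length == 1 then "YES" else "NO"

-- ===== PRECONDITION & SPEC =====
def Spec_reduceArrayLength (X : List Int) (out : String) : Prop := out = reduceArrayLength_alt X
instance (X : List Int) (out : String) : Decidable (Spec_reduceArrayLength X out) := by unfold Spec_reduceArrayLength; infer_instance

-- ===== CLAIM (what is proved, stated in full; the proofs are below) =====
def Claim_equal_reduceArrayLength : Prop := ∀ (X : List Int), Dom_reduceArrayLength X → Spec_reduceArrayLength X (reduceArrayLength X)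

-- ===== LEMMAS AND PROOFS =====

-- popping for a then for a larger b is the same as popping for b directly
theorem pop_pop (t : List Int) (a b : Int) (hab : a < b) :
    reduceArrayLengthPop (reduceArrayLengthPop t a) b = reduceArrayLengthPop t b := by
  induction t with
  | nil => simp [reduceArrayLengthPop]
  | cons h t ih =>
    by_cases hha : h < a
    · simp [reduceArrayLengthPop, hha, ih, show h < b by omega]
    · simp [reduceArrayLengthPop, hha]

theorem step_step (t : List Int) (a b : Int) (hab : a < b) :
    reduceArrayLengthStep (reduceArrayLengthStep t a) b = reduceArrayLengthStep t b := by
  simp [reduceArrayLengthStep, reduceArrayLengthPop, hab, pop_pop t a b hab]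

-- removing the left element of an ascending adjacent pair does not change the final stack
theorem foldl_remove (P S : List Int) (a b : Int) (hab : a < b) (st : List Int) :
    (P ++ b :: S).foldl reduceArrayLengthStep st
      = (P ++ a :: b :: S).foldl reduceArrayLengthStep st := by
  simp only [List.foldl_append, List.foldl_cons]
  rw [step_step _ a b hab]

-- on an adjacent-non-increasing list the stack never pops
theorem foldl_nonincr (X : List Int) (st : List Int)
    (hchain : List.IsChain (fun a b => ¬ a < b) X)
    (hhd : ∀ h x, st.head? = some h → X.head? = some x → ¬ h < x) :
    X.foldl reduceArrayLengthStep st = X.reverse ++ st := by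
  induction X generalizing st with
  | nil => simp
  | cons x X ih =>
    have hstep : reduceArrayLengthStep st x = x :: st := by
      cases st with
      | nil => simp [reduceArrayLengthStep, reduceArrayLengthPop]
      | cons h t =>
        have : ¬ h < x := hhd h x rfl rfl
        simp [reduceArrayLengthStep, reduceArrayLengthPop, this]
    rw [List.foldl_cons, hstep, ih (x :: st) hchain.tail ?_]
    · simp
    · intro h y hh hy
      cases X with
      | nil => simp at hy
      | cons z Z =>
        simp at hh hy
        subst hh hy
        exact (List.isChain_cons_cons.mp hchain).1

-- main inner-loop correspondence, by strong induction on the length bound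
theorem main_eq : ∀ n X, X.length ≤ n → reduceArrayLength X = reduceArrayLength_alt X := by
  intro n
  induction n with
  | zero =>
    intro X hX
    have : X = [] := List.eq_nil_of_length_eq_zero (by omega)
    subst this
    rw [reduceArrayLength, reduceArrayLengthLoop]
    simp [reduceArrayLength_alt]
  | succ n ihn =>
    intro X hX
    -- inner loop: once the prefix up to i has no ascending adjacent pair
    have aux : ∀ k i, X.length - 1 - i ≤ k → X.length ≠ 1 →
        (∀ j, j < i → j + 1 < X.length → ¬ X.getD j 0 < X.getD (j + 1) 0) →
        reduceArrayLengthLoop X i = reduceArrayLength_alt X := by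
      intro k
      induction k with
      | zero =>
        intro i hk hne hinv
        unfold reduceArrayLengthLoop
        have hi : ¬ i < X.length - 1 := by omega
        simp only [hi, if_false]
        have hchain : List.IsChain (fun a b => ¬ a < b) X := by
          rw [List.isChain_iff_getElem]
          intro j hj
          have h1 := hinv j (by omega) (by omega)
          simpa [List.getD_eq_getElem?_getD, List.getElem?_eq_getElem, hj,
                 show j < X.length by omega] using h1
        cases hX0 : X with
        | nil => simp [reduceArrayLength_alt]
        | cons x T =>
          rw [← hX0]
          have := foldl_nonincr X [] hchain (by simp)
          have hlen : X.length ≠ 1 := hne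
          simp only [reduceArrayLength_alt, this]
          simp only [List.append_nil, List.length_reverse]
          simp [hlen]
      | succ k ihk =>
        intro i hk hne hinv
        by_cases hi : i < X.length - 1
        swap
        · exact ihk i (by omega) hne hinv
        unfold reduceArrayLengthLoop
        · simp only [hi, if_true]
          by_cases hlt : PySem.List.pyGetD X (i : Int) 0 < PySem.List.pyGetD X ((i : Int) + 1) 0
          · simp only [hlt, if_true]
            have hcast : ((i : Int) + 1) = ((i + 1 : Nat) : Int) := by push_cast; ring
            rw [PySem.List.slice_to_natCast, hcast, PySem.List.slice_from_natCast]
            have hi1 : i + 1 < X.length := by omega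
            have hXdec : X = X.take i ++ X[i]'(by omega) :: X[i+1]'hi1 :: X.drop (i + 2) := by
              conv_lhs => rw [← List.take_append_drop i X]
              congr 1
              rw [List.drop_eq_getElem_cons (by omega)]
              congr 1
              rw [List.drop_eq_getElem_cons hi1]
            have hdrop : X.drop (i + 1) = X[i+1]'hi1 :: X.drop (i + 2) := by
              rw [List.drop_eq_getElem_cons hi1]
            have hab : X[i]'(by omega) < X[i+1]'hi1 := by
              rw [PySem.List.pyGetD_natCast, hcast, PySem.List.pyGetD_natCast] at hlt
              simpa [List.getD_eq_getElem?_getD, List.getElem?_eq_getElem,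
                     show i < X.length by omega, hi1] using hlt
            have hlen' : (X.take i ++ X.drop (i + 1)).length ≤ n := by
              simp only [List.length_append, List.length_take, List.length_drop]
              omega
            rw [ihn _ hlen']
            simp only [reduceArrayLength_alt, hdrop]
            rw [foldl_remove (X.take i) (X.drop (i + 2)) (X[i]'(by omega)) (X[i+1]'hi1) hab]
            rw [← hXdec]
          · simp only [hlt, if_false]
            apply ihk (i + 1) (by omega) hne
            intro j hj hj1
            rcases Nat.lt_or_ge j i with hji | hji
            · exact hinv j hji hj1
            · have : j = i := by omega
              subst this
              intro hcon
              apply hlt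
              have hcast : ((j : Int) + 1) = ((j + 1 : Nat) : Int) := by push_cast; ring
              rw [PySem.List.pyGetD_natCast, hcast, PySem.List.pyGetD_natCast]
              exact hcon
    unfold reduceArrayLength
    by_cases h1 : X.length == 1
    · simp only [h1, if_true]
      have : X.length = 1 := by simpa using h1
      obtain ⟨x, hx⟩ := List.length_eq_one_iff.mp this
      subst hx
      simp [reduceArrayLength_alt, reduceArrayLengthStep, reduceArrayLengthPop]
    · simp only [h1]
      exact aux (X.length - 1) 0 (by omega) (by simpa using h1) (by omega)

-- ===== VERDICT (by name: the statement is the Claim_ definition above) =====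
theorem reduceArrayLength_spec : Claim_equal_reduceArrayLength := by
  intro X _
  unfold Spec_reduceArrayLength
  exact main_eq X.length X le_rfl
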